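-- pv_equiv track=rewrite | github.com/jun915-a/rss-notification | filter.py | filter_articles_by_query
-- ===== SOURCE A (Python) =====
-- from typing import Dict, List
--
-- def filter_articles_by_query(articles: List[Dict[str, str]], query: str) -> List[Dict[str, str]]:
--     tokens = [token.strip().lower() for token in query.split() if token.strip()]
--     if not tokens:
--         return []
--
--     matched: List[Dict[str, str]] = []
--     for article in articles:
--         target = f"{article.get('title', '')} {article.get('content', '')}".lower()
--         if all(token in target for token in tokens):
--             matched.append(article)
--     return matched
-- ===== SOURCE B (Python) =====
-- from typing import Dict, List
--
-- def filter_articles_by_query(articles: List[Dict[str, str]], query: str) -> List[Dict[str, str]]: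
--     # lower the whole query first, then split; narrow the candidates one token at a time
--     tokens = query.lower().split()
--     if not tokens:
--         return []
--
--     def narrow(toks: List[str], cands: List[Dict[str, str]]) -> List[Dict[str, str]]:
--         if not toks:
--             return cands
--         head = toks[0]
--         kept = [a for a in cands
--                 if head in a.get('title', '').lower() + ' ' + a.get('content', '').lower()]
--         return narrow(toks[1:], kept)
--
--     return narrow(tokens, articles)
-- ===== Notes on version B (the rewrite author's own statement) =====
-- stated objective: alternative
-- what changed: B lowercases the whole query once and splits it (dropping A's per-token strip and emptiness filter, which are no-ops on split() output), and replaces A's single article-outer pass with an inner all() by a recursive token-outer narrowing of the candidate list that lowercases the title and content fields separately.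
import Mathlib
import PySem

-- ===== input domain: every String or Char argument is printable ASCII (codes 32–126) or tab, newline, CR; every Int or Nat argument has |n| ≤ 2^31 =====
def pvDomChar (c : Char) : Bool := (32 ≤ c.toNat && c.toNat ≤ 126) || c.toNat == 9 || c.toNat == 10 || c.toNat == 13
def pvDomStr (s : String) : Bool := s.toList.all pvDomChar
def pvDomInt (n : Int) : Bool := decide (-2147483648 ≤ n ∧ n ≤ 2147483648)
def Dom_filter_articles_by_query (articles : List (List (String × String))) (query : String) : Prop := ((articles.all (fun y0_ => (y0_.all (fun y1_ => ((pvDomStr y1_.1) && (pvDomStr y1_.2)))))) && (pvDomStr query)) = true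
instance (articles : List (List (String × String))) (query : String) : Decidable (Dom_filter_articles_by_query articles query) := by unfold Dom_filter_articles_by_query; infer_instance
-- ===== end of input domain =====

-- B lowers the whole query before splitting (dropping A's per-token strip/filter, which is a
-- no-op on split() output) and narrows the candidate list by recursion on the tokens, lowering
-- the two fields separately, instead of A's single article-outer pass with an inner all();
-- objective: alternative decomposition.

-- ===== PORT A =====
-- f"{article.get('title','')} {article.get('content','')}".lower()
def pvTargetA (article : List (String × String)) : String :=
  PySem.Str.lower (((PySem.Dict.mk article).getD "title" "") ++ " " ++ ((PySem.Dict.mk article).getD "content" ""))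

def filter_articles_by_query (articles : List (List (String × String))) (query : String) : List (List (String × String)) :=
  let tokens := ((PySem.Str.split₀ query).filter (fun token => PySem.Str.strip token != "")).map
                  (fun token => PySem.Str.lower (PySem.Str.strip token))
  if tokens = [] then []
  else
    articles.foldl (fun matched article =>
      if tokens.all (fun token => PySem.Str.isIn token (pvTargetA article)) then matched ++ [article]
      else matched) []

-- ===== PORT B =====
-- a.get('title','').lower() + ' ' + a.get('content','').lower()
def pvHay (a : List (String × String)) : String :=
  PySem.Str.lower ((PySem.Dict.mk a).getD "title" "") ++ " " ++ PySem.Str.lower ((PySem.Dict.mk a).getD "content" "")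

-- narrow(toks, cands): structural recursion of Source B's inner helper
def pvNarrow : List String → List (List (String × String)) → List (List (String × String))
  | [], cands => cands
  | head :: rest, cands => pvNarrow rest (cands.filter (fun a => PySem.Str.isIn head (pvHay a)))

def filter_articles_by_query_alt (articles : List (List (String × String))) (query : String) : List (List (String × String)) :=
  let tokens := PySem.Str.split₀ (PySem.Str.lower query)
  if tokens = [] then []
  else pvNarrow tokens articles

-- ===== PRECONDITION & SPEC =====
def Spec_filter_articles_by_query (articles : List (List (String × String))) (query : String) (out : List (List (String × String))) : Prop := out = filter_articles_by_query_alt articles query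
instance (articles : List (List (String × String))) (query : String) (out : List (List (String × String))) : Decidable (Spec_filter_articles_by_query articles query out) := by unfold Spec_filter_articles_by_query; infer_instance

-- ===== CLAIM (what is proved, stated in full; the proofs are below) =====
def Claim_equal_filter_articles_by_query : Prop := ∀ (articles : List (List (String × String))) (query : String), Dom_filter_articles_by_query articles query → Spec_filter_articles_by_query articles query (filter_articles_by_query articles query)

-- ===== LEMMAS AND PROOFS =====

-- lowercasing never creates or destroys whitespace
theorem pv_isspace_lowerChar (c : Char) :
    PySem.Chars.isspace (PySem.Chars.lowerChar c) = PySem.Chars.isspace c := by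
  unfold PySem.Chars.lowerChar
  split_ifs with h
  · unfold PySem.Chars.isupper at h
    simp only [Bool.and_eq_true, decide_eq_true_eq, Char.le_def] at h
    have h1 : 65 ≤ c.toNat := h.1
    have h2 : c.toNat ≤ 90 := h.2
    have hv : (Char.ofNat (c.toNat + 32)).toNat = c.toNat + 32 := by
      have hval : (c.toNat + 32).isValidChar := Or.inl (by omega)
      rw [Char.toNat_ofNat, if_pos hval]
    unfold PySem.Chars.isspace
    simp only [hv]
    have l : ∀ n : Nat, 65 ≤ n → n ≤ 122 →
        ((decide (n = 32) || decide (9 ≤ n) && decide (n ≤ 13) || decide (28 ≤ n) && decide (n ≤ 31) ||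
          decide (n = 133) || decide (n = 160) || decide (n = 5760) ||
          decide (8192 ≤ n) && decide (n ≤ 8202) || decide (n = 8232) || decide (n = 8233) ||
          decide (n = 8239) || decide (n = 8287) || decide (n = 12288)) = false) := by
      intro n ha hb
      simp only [Bool.or_eq_false_iff, Bool.and_eq_false_iff, decide_eq_false_iff_not]
      omega
    rw [l _ (by omega) (by omega), l _ (by omega) (by omega)]
  · rfl

-- split() commutes with per-character lowercasing (invariant form over split₀.go)
theorem pv_go_lower (s cur : List Char) (acc : List (List Char)) :
    PySem.Chars.split₀.go (s.map PySem.Chars.lowerChar) (cur.map PySem.Chars.lowerChar)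
        (acc.map (·.map PySem.Chars.lowerChar))
      = (PySem.Chars.split₀.go s cur acc).map (·.map PySem.Chars.lowerChar) := by
  induction s generalizing cur acc with
  | nil =>
      simp only [List.map_nil, PySem.Chars.split₀.go, List.isEmpty_map]
      split_ifs <;> simp [List.map_reverse]
  | cons c rest ih =>
      simp only [List.map_cons, PySem.Chars.split₀.go, pv_isspace_lowerChar, List.isEmpty_map]
      split_ifs with h1 h2
      · exact ih [] acc
      · have := ih [] (cur.reverse :: acc)
        simpa [List.map_reverse] using this
      · exact ih (c :: cur) acc

theorem pv_split₀_lower (cs : List Char) :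
    PySem.Chars.split₀ (PySem.Chars.lower cs) = (PySem.Chars.split₀ cs).map PySem.Chars.lower := by
  have := pv_go_lower cs [] []
  simpa [PySem.Chars.split₀, PySem.Chars.lower] using this

-- every word produced by split() is nonempty and whitespace-free
theorem pv_go_words (s cur : List Char) (acc : List (List Char))
    (hc : ∀ c ∈ cur, PySem.Chars.isspace c = false)
    (ha : ∀ w ∈ acc, w ≠ [] ∧ ∀ c ∈ w, PySem.Chars.isspace c = false) :
    ∀ t ∈ PySem.Chars.split₀.go s cur acc, t ≠ [] ∧ ∀ c ∈ t, PySem.Chars.isspace c = false := by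
  induction s generalizing cur acc with
  | nil =>
      simp only [PySem.Chars.split₀.go]
      split_ifs with h
      · intro t ht; exact ha t (List.mem_reverse.mp ht)
      · intro t ht
        rcases List.mem_cons.mp (List.mem_reverse.mp ht) with h' | h'
        · subst h'
          constructor
          · simpa [List.isEmpty_iff] using h
          · intro c hc'; exact hc c (List.mem_reverse.mp hc')
        · exact ha t h'
  | cons c rest ih =>
      simp only [PySem.Chars.split₀.go]
      split_ifs with h1 h2
      · exact ih [] acc (by simp) ha
      · refine ih [] (cur.reverse :: acc) (by simp) ?_
        intro w hw
        rcases List.mem_cons.mp hw with h' | h'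
        · subst h'
          refine ⟨by simpa [List.isEmpty_iff] using h2, ?_⟩
          intro d hd; exact hc d (List.mem_reverse.mp hd)
        · exact ha w h'
      · refine ih (c :: cur) acc ?_ ha
        intro d hd
        rcases List.mem_cons.mp hd with h' | h'
        · subst h'; simpa using h1
        · exact hc d h'

theorem pv_split₀_words (cs : List Char) :
    ∀ t ∈ PySem.Chars.split₀ cs, t ≠ [] ∧ ∀ c ∈ t, PySem.Chars.isspace c = false := by
  have := pv_go_words cs [] [] (by simp) (by simp)
  simpa [PySem.Chars.split₀] using this

-- strip() is the identity on a whitespace-free word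
theorem pv_strip_id (w : List Char) (h : ∀ c ∈ w, PySem.Chars.isspace c = false) :
    PySem.Chars.strip w = w := by
  unfold PySem.Chars.strip PySem.Chars.lstrip PySem.Chars.rstrip
  have l : ∀ v : List Char, (∀ c ∈ v, PySem.Chars.isspace c = false) →
      List.dropWhile PySem.Chars.isspace v = v := by
    intro v hv
    cases v with
    | nil => rfl
    | cons a t =>
        rw [List.dropWhile_cons_of_neg]
        simp [hv a (List.mem_cons_self)]
  rw [l w h, l w.reverse (fun c hc => h c (List.mem_reverse.mp hc)), List.reverse_reverse]

-- A's token pipeline equals B's: strip/filter are no-ops on split() words, and lower commutes with split()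
theorem pv_tokens_eq (q : String) :
    ((PySem.Str.split₀ q).filter (fun token => PySem.Str.strip token != "")).map
        (fun token => PySem.Str.lower (PySem.Str.strip token))
      = PySem.Str.split₀ (PySem.Str.lower q) := by
  have hW := pv_split₀_words q.toList
  rw [PySem.Str.split₀, PySem.Str.split₀, PySem.Str.lower, String.toList_ofList, pv_split₀_lower]
  rw [List.filter_map]
  have hfilter : (PySem.Chars.split₀ q.toList).filter
      ((fun token => PySem.Str.strip token != "") ∘ String.ofList) = PySem.Chars.split₀ q.toList := by
    apply List.filter_eq_self.mpr
    intro w hw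
    have hne := (hW w hw).1
    have hs := pv_strip_id w (hW w hw).2
    simp only [Function.comp, PySem.Str.strip, String.toList_ofList, hs, bne_iff_ne, ne_eq]
    intro hcontra
    exact hne (by simpa using congrArg String.toList hcontra)
  rw [hfilter, List.map_map, List.map_map]
  apply List.map_congr_left
  intro w hw
  have hs := pv_strip_id w (hW w hw).2
  simp [Function.comp, PySem.Str.strip, PySem.Str.lower, String.toList_ofList, hs,
    PySem.Chars.lower]

-- lower distributes over concatenation
theorem pv_lower_append (x y : String) :
    PySem.Str.lower (x ++ y) = PySem.Str.lower x ++ PySem.Str.lower y := by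
  apply String.toList_inj.mp
  simp [PySem.Str.toList_lower, String.toList_append, PySem.Chars.lower]

-- A's lowered haystack equals B's field-wise lowered haystack
theorem pv_target_eq : pvTargetA = pvHay := by
  funext a
  unfold pvTargetA pvHay
  rw [pv_lower_append, pv_lower_append]
  have : PySem.Str.lower " " = " " := by decide
  rw [this]

-- Source B's recursive narrowing = one filter with the conjunction of all the per-token tests
theorem pv_narrow_eq_filter (ts : List String) :
    ∀ cands, pvNarrow ts cands
      = cands.filter (fun a => ts.all (fun t => PySem.Str.isIn t (pvHay a))) := by
  induction ts with
  | nil => intro cands; simp [pvNarrow]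
  | cons t rest ih =>
      intro cands
      simp only [pvNarrow, ih, List.filter_filter, List.all_cons]
      exact List.filter_congr (fun a _ => by simp [Bool.and_comm])

-- ===== VERDICT (by name: the statement is the Claim_ definition above) =====
theorem filter_articles_by_query_spec : Claim_equal_filter_articles_by_query := by
  intro articles query _
  unfold Spec_filter_articles_by_query filter_articles_by_query filter_articles_by_query_alt
  simp only []
  rw [pv_tokens_eq query]
  by_cases h : PySem.Str.split₀ (PySem.Str.lower query) = []
  · simp [h]
  · simp only [if_neg h]
    rw [pv_narrow_eq_filter, ← pv_target_eq]
    exact (PySem.List.foldl_append_if_eq_filter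
      (fun article => (PySem.Str.split₀ (PySem.Str.lower query)).all
        (fun token => PySem.Str.isIn token (pvTargetA article))) articles []).trans (by simp)
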